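-- pv_equiv track=rewrite | github.com/BOA-PFL/XSENSOR | PerformanceText_Baseball_ExtractVarsXSENSOR_RightFoot.py | findHit
-- ===== SOURCE A (Python) =====
-- def findHit(force, hitThresh):
--     """
--     This function finds the landings from force plate data
--     it uses a heuristic to determine landings from when the smoothed force is
--     0 and then breaches a threshold
--
--     Parameters
--     ----------
--     force : Pandas Series
--         Vertical force from force plate.
--     fThresh: integer
--         Value force has to be greater than to count as a takeoff/landing
--
--     Returns
--     -------
--     lic : list
--         Indices of landings.
--
--     """
--     lic = []
--
--     for swing in range(len(force)-1):
--         if len(lic) == 0: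
--
--             if force[swing] >1000 and force[swing + 1] >= hitThresh and force [swing] > 200:
--                 lic.append(swing)
--
--         else:
--
--             if force[swing] >1000 and force[swing + 1] >= hitThresh and swing > lic[-1] + 200 and force [swing] > 200:
--                 lic.append(swing)
--     return lic
-- ===== SOURCE B (Python) =====
-- def findHit(force, hitThresh):
--     candidates = [i for i in range(len(force) - 1)
--                   if force[i] > 1000 and force[i + 1] >= hitThresh and force[i] > 200]
--     lic = []
--     last = None
--     for i in candidates:
--         if last is None or i > last + 200:
--             lic.append(i)
--             last = i
--     return lic
-- ===== Notes on version B (the rewrite author's own statement) =====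
-- stated objective: alternative
-- what changed: Replaces A's single fused loop (which re-tests list emptiness and the last-selected index inside the scan) with a two-phase structure: first build the list of threshold-breaching candidate indices, then greedily select them with a 'last selected' accumulator enforcing the >200 spacing.
import Mathlib
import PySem

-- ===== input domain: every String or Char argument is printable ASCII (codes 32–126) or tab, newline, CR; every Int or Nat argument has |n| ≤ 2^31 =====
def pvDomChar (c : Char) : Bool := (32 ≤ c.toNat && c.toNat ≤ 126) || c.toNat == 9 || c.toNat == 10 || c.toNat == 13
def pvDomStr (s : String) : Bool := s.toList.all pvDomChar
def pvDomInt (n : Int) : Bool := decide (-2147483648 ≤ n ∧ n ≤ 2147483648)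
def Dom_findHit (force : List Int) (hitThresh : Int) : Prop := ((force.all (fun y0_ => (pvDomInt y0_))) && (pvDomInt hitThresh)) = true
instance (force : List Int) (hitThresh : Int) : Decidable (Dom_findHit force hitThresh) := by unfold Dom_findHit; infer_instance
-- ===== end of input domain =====

-- B replaces A's single fused loop by a two-phase structure (build candidate indices, then
-- greedily select with a 'last selected' accumulator); same cost, different decomposition.

-- ===== PORT A =====
-- A's loop body.  'swing' ranges over 0 .. len(force)-2, so force[swing] and force[swing+1]
-- never raise in Python; pyGetD with default 0 is exact on those in-range indices.
-- In the else-branch lic is nonempty, so Python's lic[-1] is lic's last element: getLastD 0 is exact.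
def findHitStepA (force : List Int) (hitThresh : Int) (lic : List Int) (swing : Int) : List Int :=
  if lic = [] then
    if PySem.List.pyGetD force swing 0 > 1000 ∧ PySem.List.pyGetD force (swing + 1) 0 ≥ hitThresh
        ∧ PySem.List.pyGetD force swing 0 > 200
    then lic ++ [swing] else lic
  else
    if PySem.List.pyGetD force swing 0 > 1000 ∧ PySem.List.pyGetD force (swing + 1) 0 ≥ hitThresh
        ∧ swing > lic.getLastD 0 + 200 ∧ PySem.List.pyGetD force swing 0 > 200
    then lic ++ [swing] else lic

def findHit (force : List Int) (hitThresh : Int) : List Int :=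
  (PySem.List.pyRange 0 ((force.length : Int) - 1) 1).foldl (findHitStepA force hitThresh) []

-- ===== PORT B =====
-- candidate test of Source B's comprehension (indices in range, see note above)
def findHitCand (force : List Int) (hitThresh : Int) (i : Int) : Bool :=
  decide (PySem.List.pyGetD force i 0 > 1000) && decide (PySem.List.pyGetD force (i + 1) 0 ≥ hitThresh)
    && decide (PySem.List.pyGetD force i 0 > 200)

-- greedy selection step: state = (lic, last), last = None ↦ none
def findHitStepB (st : List Int × Option Int) (i : Int) : List Int × Option Int :=
  match st.2 with
  | none => (st.1 ++ [i], some i)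
  | some last => if i > last + 200 then (st.1 ++ [i], some i) else st

def findHit_alt (force : List Int) (hitThresh : Int) : List Int :=
  let candidates := (PySem.List.pyRange 0 ((force.length : Int) - 1) 1).filter (findHitCand force hitThresh)
  (candidates.foldl findHitStepB ([], none)).1

-- ===== PRECONDITION & SPEC =====
def Spec_findHit (force : List Int) (hitThresh : Int) (out : List Int) : Prop := out = findHit_alt force hitThresh
instance (force : List Int) (hitThresh : Int) (out : List Int) : Decidable (Spec_findHit force hitThresh out) := by unfold Spec_findHit; infer_instance

-- ===== CLAIM (what is proved, stated in full; the proofs are below) =====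
def Claim_equal_findHit : Prop := ∀ (force : List Int) (hitThresh : Int), Dom_findHit force hitThresh → Spec_findHit force hitThresh (findHit force hitThresh)

-- ===== LEMMAS AND PROOFS =====

-- Invariant: A's fold over any index list equals B's greedy fold over the filtered list,
-- with B's 'last' component tracking the last element of A's accumulator.
lemma findHit_key (force : List Int) (hitThresh : Int) :
    ∀ (l : List Int) (lic : List Int),
      l.foldl (findHitStepA force hitThresh) lic
        = ((l.filter (findHitCand force hitThresh)).foldl findHitStepB (lic, lic.getLast?)).1 := by
  intro l
  induction l with
  | nil => intro lic; rfl
  | cons i t ih =>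
    intro lic
    rw [List.foldl_cons, List.filter_cons]
    by_cases hC : PySem.List.pyGetD force i 0 > 1000 ∧ PySem.List.pyGetD force (i + 1) 0 ≥ hitThresh
        ∧ PySem.List.pyGetD force i 0 > 200
    · have hc : findHitCand force hitThresh i = true := by
        simp [findHitCand, hC.1, hC.2.1, hC.2.2]
      rw [if_pos hc, List.foldl_cons]
      rcases eq_or_ne lic [] with hemp | hne
      · subst hemp
        have hA : findHitStepA force hitThresh [] i = [] ++ [i] := by
          simp only [findHitStepA]
          rw [if_pos trivial, if_pos hC]
        have hB : findHitStepB (([] : List Int), ([] : List Int).getLast?) i = ([] ++ [i], some i) := rfl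
        rw [hA, hB, ih ([] ++ [i])]
        simp
      · have hlast : lic.getLast? = some (lic.getLastD 0) := by
          cases lic with
          | nil => exact absurd rfl hne
          | cons a as => simp [List.getLastD_eq_getLast?, List.getLast?_cons]
        by_cases hgap : i > lic.getLastD 0 + 200
        · have hA : findHitStepA force hitThresh lic i = lic ++ [i] := by
            simp only [findHitStepA]
            rw [if_neg hne, if_pos ⟨hC.1, hC.2.1, hgap, hC.2.2⟩]
          have hB : findHitStepB (lic, lic.getLast?) i = (lic ++ [i], some i) := by
            rw [hlast]; simp only [findHitStepB]; rw [if_pos hgap]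
          rw [hA, hB, ih (lic ++ [i]), List.getLast?_concat]
        · have hA : findHitStepA force hitThresh lic i = lic := by
            simp only [findHitStepA]
            rw [if_neg hne, if_neg]
            rintro ⟨_, _, hg, _⟩; exact hgap hg
          have hB : findHitStepB (lic, lic.getLast?) i = (lic, lic.getLast?) := by
            conv_lhs => rw [hlast]
            simp only [findHitStepB]
            rw [if_neg hgap, hlast]
          rw [hA, hB]
          exact ih lic
    · have hc : findHitCand force hitThresh i = false := by
        simp only [findHitCand]
        by_cases h1 : PySem.List.pyGetD force i 0 > 1000 <;>
          by_cases h2 : PySem.List.pyGetD force (i + 1) 0 ≥ hitThresh <;>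
          by_cases h3 : PySem.List.pyGetD force i 0 > 200 <;>
          simp_all
      have hA : findHitStepA force hitThresh lic i = lic := by
        by_cases hemp : lic = []
        · simp only [findHitStepA]
          rw [if_pos hemp, if_neg hC]
        · simp only [findHitStepA]
          rw [if_neg hemp, if_neg]
          rintro ⟨h1, h2, _, h3⟩; exact hC ⟨h1, h2, h3⟩
      rw [if_neg (by simp [hc]), hA]
      exact ih lic

-- ===== VERDICT (by name: the statement is the Claim_ definition above) =====
theorem findHit_spec : Claim_equal_findHit := by
  intro force hitThresh _
  unfold Spec_findHit findHit findHit_alt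
  rw [findHit_key]
  rfl
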